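-- pv_equiv track=rewrite | github.com/cnash6/advent | 2018/p02.py | checkBox
-- ===== SOURCE A (Python) =====
-- def checkBox(box):
--     chars = {}
--     two = False
--     three = False
--     for c in box:
--         if c in chars:
--             chars[c] += 1
--         else:
--             chars[c] = 1
--     for k in chars:
--         if chars[k] is 2:
--             two = True
--         if chars[k] is 3:
--             three = True
--     return (two, three)
-- ===== SOURCE B (Python) =====
-- def checkBox(box):
--     two = three = False
--     s = sorted(box)
--     i = 0
--     n = len(s)
--     while i < n:
--         c = s[i]
--         j = i
--         while j < n and s[j] == c:
--             j += 1
--         if j - i == 2: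
--             two = True
--         if j - i == 3:
--             three = True
--         i = j
--     return (two, three)
-- ===== Notes on version B (the rewrite author's own statement) =====
-- stated objective: alternative
-- what changed: Replaces the hash-table character counter plus key scan with a sort-then-group pass: sort the characters, walk the sorted list measuring each run of equal adjacent characters, and set the two/three flags from the run lengths.
import Mathlib
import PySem

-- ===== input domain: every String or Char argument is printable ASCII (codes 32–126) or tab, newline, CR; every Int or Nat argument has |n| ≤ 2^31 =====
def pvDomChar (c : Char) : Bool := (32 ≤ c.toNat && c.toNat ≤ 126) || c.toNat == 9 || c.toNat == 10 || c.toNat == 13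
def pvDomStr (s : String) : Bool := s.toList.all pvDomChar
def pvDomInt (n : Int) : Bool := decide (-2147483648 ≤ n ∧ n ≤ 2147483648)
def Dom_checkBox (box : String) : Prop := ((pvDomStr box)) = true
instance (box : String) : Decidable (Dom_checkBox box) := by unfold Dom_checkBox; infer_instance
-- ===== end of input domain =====

-- B replaces A's hash-table character counter + key scan with a sort-then-group-runs pass (alternative algorithm, same results).


-- ===== PORT A =====
-- chars = {}; for c in box: chars[c] = chars[c] + 1 if c in chars else 1;
-- then for k in chars: set the flags on count 2 / 3 (CPython's small-int caching makes A's `is 2`/`is 3` equality tests here)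
def checkBox (box : String) : Bool × Bool :=
  let chars : PySem.Dict Char Int :=
    box.toList.foldl
      (fun d c => if d.contains c then d.insert c (d.getD c 0 + 1) else d.insert c 1)
      PySem.Dict.empty
  chars.keys.foldl
    (fun tt k =>
      ((if chars.getD k 0 == 2 then true else tt.1),
       (if chars.getD k 0 == 3 then true else tt.2)))
    (false, false)

-- ===== PORT B =====
-- the grouping loop of Source B: at each step the inner `while s[j] == c` scan reads the run of characters
-- equal to the first remaining one (= takeWhile), the flags are set from its length, and `i = j` skips past it (= dropWhile)
def groupRuns : List Char → Bool → Bool → Bool × Bool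
  | [], two, three => (two, three)
  | c :: t, two, three =>
    let run := (List.takeWhile (· == c) (c :: t)).length
    let rest := List.dropWhile (· == c) (c :: t)
    groupRuns rest (if run == 2 then true else two) (if run == 3 then true else three)
  termination_by s _ _ => s.length
  decreasing_by
    simp only [List.dropWhile_cons, beq_self_eq_true, if_true]
    exact Nat.lt_succ_of_le (List.length_dropWhile_le _ _)

def checkBox_alt (box : String) : Bool × Bool :=
  groupRuns (PySem.List.sorted box.toList (fun c => c) false) false false

-- ===== PRECONDITION & SPEC =====
def Spec_checkBox (box : String) (out : Bool × Bool) : Prop := out = checkBox_alt box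
instance (box : String) (out : Bool × Bool) : Decidable (Spec_checkBox box out) := by unfold Spec_checkBox; infer_instance

-- ===== CLAIM (what is proved, stated in full; the proofs are below) =====
def Claim_equal_checkBox : Prop := ∀ (box : String), Dom_checkBox box → Spec_checkBox box (checkBox box)

-- ===== LEMMAS AND PROOFS =====

-- A's counting-loop body is exactly the Counter update step
lemma stepA_eq_modify (d : PySem.Dict Char Int) (c : Char) :
    (if d.contains c then d.insert c (d.getD c 0 + 1) else d.insert c 1)
      = d.modify c 0 (· + 1) := by
  by_cases h : d.contains c = true
  · simp [h, PySem.Dict.modify]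
  · simp only [Bool.not_eq_true] at h
    simp [h, PySem.Dict.modify, PySem.Dict.getD_of_not_contains d 0 h]

-- A's flag-setting fold returns "initial flag or some key satisfies the test"
lemma flag_fold (ys : List Char) (p q : Char → Bool) (a b : Bool) :
    ys.foldl
      (fun tt k => ((if p k then true else tt.1), (if q k then true else tt.2)))
      (a, b) = (a || ys.any p, b || ys.any q) := by
  induction ys generalizing a b with
  | nil => simp
  | cons y ys ih =>
    simp only [List.foldl_cons, List.any_cons, ih]
    by_cases hp : p y = true <;> by_cases hq : q y = true <;> simp [hp, hq]

-- "some key of the counter has count m" stated over the underlying list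
lemma any_count (l : List Char) (mi : Int) (m : Nat) (hm : mi = (m : Int)) :
    (PySem.Set.ofList l).any (fun k => ((PySem.Dict.counter l).getD k 0 == mi))
      = decide (∃ x ∈ l, l.count x = m) := by
  subst hm
  rw [Bool.eq_iff_iff]
  simp only [List.any_eq_true, PySem.Set.mem_ofList, PySem.Dict.getD_counter,
    beq_iff_eq, decide_eq_true_eq, Nat.cast_inj]

-- evaluation of port A: a flag is set iff some character occurs exactly 2 (resp. 3) times
lemma checkBox_eval (box : String) :
    checkBox box = (decide (∃ x ∈ box.toList, box.toList.count x = 2),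
                    decide (∃ x ∈ box.toList, box.toList.count x = 3)) := by
  unfold checkBox
  have hstep : (fun (d : PySem.Dict Char Int) (c : Char) =>
      if d.contains c then d.insert c (d.getD c 0 + 1) else d.insert c 1)
      = (fun d c => d.modify c 0 (· + 1)) := by
    funext d c; exact stepA_eq_modify d c
  rw [hstep, ← PySem.Dict.counter_eq_foldl, flag_fold, PySem.Dict.keys_counter]
  simp only [Bool.false_or]
  rw [any_count box.toList 2 2 (by norm_num), any_count box.toList 3 3 (by norm_num)]

-- core lemma for B: grouping the runs of a sorted list reads off the multiplicities
set_option maxHeartbeats 1000000 in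
lemma groupRuns_eval : ∀ (n : Nat) (s : List Char), s.length ≤ n → s.Pairwise (· ≤ ·) →
    ∀ two three : Bool,
    groupRuns s two three
      = (two || decide (∃ x ∈ s, s.count x = 2),
         three || decide (∃ x ∈ s, s.count x = 3)) := by
  intro n
  induction n with
  | zero =>
    intro s hlen _ two three
    have : s = [] := List.eq_nil_of_length_eq_zero (Nat.le_zero.mp hlen)
    subst this; simp [groupRuns]
  | succ n ih =>
    intro s hlen hs two three
    match s with
    | [] => simp [groupRuns]
    | c :: t =>
      rw [groupRuns]
      set k := List.takeWhile (· == c) (c :: t) with hk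
      set rest := List.dropWhile (· == c) (c :: t) with hrest
      have hsplit : k ++ rest = c :: t := List.takeWhile_append_dropWhile
      have hrest_t : rest = List.dropWhile (· == c) t := by
        simp [hrest]
      have hrest_sorted : rest.Pairwise (· ≤ ·) :=
        List.Pairwise.sublist (hrest ▸ List.dropWhile_sublist _) hs
      -- every element left after the run is strictly above c (so c is exhausted by the run)
      have hgt : ∀ x ∈ rest, c < x := by
        cases hr : rest with
        | nil => simp
        | cons h r =>
          have hph : ((h == c) : Bool) = false := by
            have := List.head_dropWhile_not (· == c) (l := (c :: t)) (by simp [← hrest, hr])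
            simpa [← hrest, hr] using this
          have hhne : h ≠ c := by simpa using hph
          have hht : h ∈ t := by
            have : h ∈ rest := by simp [hr]
            exact (List.Sublist.mem this (hrest_t ▸ List.dropWhile_sublist _))
          have hch : c < h := lt_of_le_of_ne (List.rel_of_pairwise_cons hs hht) (Ne.symm hhne)
          intro x hx
          rcases List.mem_cons.mp hx with rfl | hx
          · exact hch
          · exact lt_of_lt_of_le hch (List.rel_of_pairwise_cons (hr ▸ hrest_sorted) hx)
      have hnotmem : c ∉ rest := fun h => absurd rfl (ne_of_gt (hgt c h))
      have hkall : ∀ x ∈ k, x = c := by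
        intro x hx
        simpa using List.mem_takeWhile_imp hx
      have hcount_c : (c :: t).count c = k.length := by
        rw [← hsplit, List.count_append]
        rw [List.count_eq_zero.mpr hnotmem, List.count_eq_length.mpr (fun b hb => (hkall b hb).symm)]
        simp
      have hcount_rest : ∀ x ∈ rest, (c :: t).count x = rest.count x := by
        intro x hx
        have hxc : x ≠ c := ne_of_gt (hgt x hx)
        rw [← hsplit, List.count_append, List.count_eq_zero.mpr, Nat.zero_add]
        intro hxk; exact hxc (hkall x hxk)
      -- a character of count m is either c itself (count = run length) or lives in the remainder
      have hex : ∀ m : Nat, (∃ x ∈ c :: t, (c :: t).count x = m) ↔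
          (k.length = m ∨ ∃ x ∈ rest, rest.count x = m) := by
        intro m
        constructor
        · rintro ⟨x, hx, hcnt⟩
          rw [← hsplit] at hx
          rcases List.mem_append.mp hx with hx | hx
          · left
            have hxc := hkall x hx; subst hxc
            rw [hcount_c] at hcnt; exact hcnt
          · right; exact ⟨x, hx, by rw [← hcount_rest x hx]; exact hcnt⟩
        · rintro (hm | ⟨x, hx, hcnt⟩)
          · exact ⟨c, List.mem_cons_self, by rw [hcount_c]; exact hm⟩
          · refine ⟨x, ?_, by rw [hcount_rest x hx]; exact hcnt⟩
            rw [← hsplit]; exact List.mem_append.mpr (Or.inr hx)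
      have hlen' : rest.length ≤ n := by
        have h1 : rest.length ≤ t.length := hrest_t ▸ List.length_dropWhile_le _ _
        have h2 : t.length ≤ n := by simpa using Nat.le_of_succ_le_succ (by simpa using hlen)
        omega
      rw [ih rest hlen' hrest_sorted]
      have h2 := hex 2
      have h3 := hex 3
      simp only [Prod.mk.injEq]
      have hif : ∀ (b x : Bool), (if b = true then true else x) = (b || x) := by decide
      refine ⟨?_, ?_⟩
      · rw [hif (k.length == 2) two, Bool.eq_iff_iff]
        simp only [Bool.or_eq_true, decide_eq_true_eq, beq_iff_eq, h2]
        tauto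
      · rw [hif (k.length == 3) three, Bool.eq_iff_iff]
        simp only [Bool.or_eq_true, decide_eq_true_eq, beq_iff_eq, h3]
        tauto

-- evaluation of port B: sorting permutes, so the same multiplicities are read off
lemma checkBox_alt_eval (box : String) :
    checkBox_alt box = (decide (∃ x ∈ box.toList, box.toList.count x = 2),
                        decide (∃ x ∈ box.toList, box.toList.count x = 3)) := by
  unfold checkBox_alt
  set s := PySem.List.sorted box.toList (fun c => c) false with hsdef
  have hperm : s.Perm box.toList := PySem.List.sorted_perm _ _ _
  have hpw : s.Pairwise (· ≤ ·) := by
    simpa using PySem.List.sorted_pairwise box.toList (fun c => c)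
  rw [groupRuns_eval s.length s le_rfl hpw]
  simp only [Bool.false_or]
  have hiff : ∀ m : Nat, (∃ x ∈ s, s.count x = m) ↔ (∃ x ∈ box.toList, box.toList.count x = m) := fun m =>
    ⟨fun ⟨x, hx, hc⟩ => ⟨x, hperm.mem_iff.mp hx, by rw [← hperm.count_eq]; exact hc⟩,
     fun ⟨x, hx, hc⟩ => ⟨x, hperm.mem_iff.mpr hx, by rw [hperm.count_eq]; exact hc⟩⟩
  simp only [Prod.mk.injEq]
  refine ⟨?_, ?_⟩ <;> rw [Bool.eq_iff_iff] <;> simp only [decide_eq_true_eq] <;>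
    [exact hiff 2; exact hiff 3]

-- ===== VERDICT (by name: the statement is the Claim_ definition above) =====
theorem checkBox_spec : Claim_equal_checkBox := by
  intro box _
  unfold Spec_checkBox
  rw [checkBox_eval, checkBox_alt_eval]
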